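-- pv_equiv track=rewrite | github.com/frezilla/aoc | 2015/11/main.py | check_increasing_straight
-- ===== SOURCE A (Python) =====
-- def check_increasing_straight(password):
--     password_length = len(password)
--     previous_ascii = -1
--     size = 0
--     for i in range(password_length):
--         current_ascii = ord(password[i])
--         if previous_ascii + 1 == current_ascii:
--             if size == 0:
--                 size = 1
--             size += 1
--         else:
--             size = 0
--         if size >= 3:
--             return True
--         previous_ascii = current_ascii
--     return size >= 3
-- ===== SOURCE B (Python) =====
-- def check_increasing_straight(password):
--     for i in range(len(password) - 2):
--         a, b, c = ord(password[i]), ord(password[i + 1]), ord(password[i + 2])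
--         if b == a + 1 and c == b + 1:
--             return True
--     return False
-- ===== Notes on version B (the rewrite author's own statement) =====
-- stated objective: simpler
-- what changed: Replaces the running run-length counter state machine by a direct sliding-window check of each consecutive triple of character codes.
import Mathlib
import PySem

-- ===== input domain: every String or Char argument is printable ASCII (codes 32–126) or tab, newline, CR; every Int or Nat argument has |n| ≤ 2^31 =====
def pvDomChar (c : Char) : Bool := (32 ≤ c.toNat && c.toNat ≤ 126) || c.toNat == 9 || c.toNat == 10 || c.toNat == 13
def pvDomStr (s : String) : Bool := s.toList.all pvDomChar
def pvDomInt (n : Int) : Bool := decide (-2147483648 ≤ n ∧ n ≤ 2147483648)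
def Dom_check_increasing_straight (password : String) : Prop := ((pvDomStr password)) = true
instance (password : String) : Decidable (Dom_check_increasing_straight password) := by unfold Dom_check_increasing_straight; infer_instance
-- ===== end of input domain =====

-- B replaces A's running-counter state machine with a direct sliding-window check of each consecutive triple (simpler decomposition).


-- ===== PORT A =====
-- the for-loop over the characters, carrying (previous_ascii, size); early return on size ≥ 3
def pvLoopA : List Char → Int → Int → Bool
  | [], _, size => size ≥ 3
  | c :: rest, prev, size =>
    let cur : Int := c.toNat
    let size' : Int := if prev + 1 = cur then (if size = 0 then (1 : Int) else size) + 1 else 0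
    if size' ≥ 3 then true else pvLoopA rest cur size'

def check_increasing_straight (password : String) : Bool :=
  pvLoopA password.toList (-1) 0

-- ===== PORT B =====
-- sliding window: scan each consecutive triple of character codes
def pvLoopB : List Char → Bool
  | a :: b :: c :: rest =>
    if (b.toNat : Int) = (a.toNat : Int) + 1 ∧ (c.toNat : Int) = (b.toNat : Int) + 1 then true
    else pvLoopB (b :: c :: rest)
  | _ => false

def check_increasing_straight_alt (password : String) : Bool :=
  pvLoopB password.toList

-- ===== PRECONDITION & SPEC =====
def Spec_check_increasing_straight (password : String) (out : Bool) : Prop := out = check_increasing_straight_alt password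
instance (password : String) (out : Bool) : Decidable (Spec_check_increasing_straight password out) := by unfold Spec_check_increasing_straight; infer_instance

-- ===== CLAIM (what is proved, stated in full; the proofs are below) =====
def Claim_equal_check_increasing_straight : Prop := ∀ (password : String), Dom_check_increasing_straight password → Spec_check_increasing_straight password (check_increasing_straight password)

-- ===== LEMMAS AND PROOFS =====

-- triple scan over integer codes, used to bridge the two loops
def pvTri : List Int → Bool
  | a :: b :: c :: rest => if b = a + 1 ∧ c = b + 1 then true else pvTri (b :: c :: rest)
  | _ => false

theorem pvLoopB_eq_tri : ∀ l : List Char, pvLoopB l = pvTri (l.map (fun c => (c.toNat : Int))) := by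
  intro l
  induction l with
  | nil => rfl
  | cons a t ih =>
    match t with
    | [] => rfl
    | [b] => rfl
    | b :: c :: r =>
      simp only [pvLoopB, pvTri, List.map]
      split_ifs with h
      · rfl
      · exact ih

theorem pvLoopA_two (l : List Char) (p : Int) :
    pvLoopA l p 2 = ((match l with | a :: _ => decide ((a.toNat : Int) = p + 1) | [] => false) || pvLoopA l p 0) := by
  match l with
  | [] => rfl
  | a :: rest =>
    simp only [pvLoopA]
    by_cases h : p + 1 = (a.toNat : Int)
    · simp [h]
    · have h' : ¬ ((a.toNat : Int) = p + 1) := fun hh => h hh.symm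
      simp [h, h']

theorem pvLoopA_eq_tri : ∀ (l : List Char) (p : Int),
    pvLoopA l p 0 = pvTri (p :: l.map (fun c => (c.toNat : Int))) := by
  intro l
  induction l with
  | nil => intro p; rfl
  | cons a rest ih =>
    intro p
    simp only [pvLoopA, List.map]
    by_cases h : p + 1 = (a.toNat : Int)
    · simp only [h]
      norm_num
      rw [pvLoopA_two, ih]
      match rest with
      | [] => simp [pvTri]
      | b :: r =>
        simp only [List.map, pvTri]
        by_cases hb : (b.toNat : Int) = (a.toNat : Int) + 1
        · simp [hb, h.symm]
        · simp [hb]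
    · simp only [h]
      norm_num
      rw [ih]
      match rest with
      | [] => simp [pvTri]
      | b :: r =>
        simp only [List.map, pvTri]
        split_ifs with hc
        · exact absurd hc.1.symm h
        · rfl

-- dropping the initial sentinel -1 is sound: no Dom character has code 0
theorem pvTri_sentinel (l : List Int) (h : ∀ x ∈ l, (9:Int) ≤ x) : pvTri ((-1) :: l) = pvTri l := by
  match l with
  | [] => rfl
  | [a] => rfl
  | a :: b :: r =>
    have ha : (9:Int) ≤ a := h a (by simp)
    simp only [pvTri]
    split_ifs with hc
    · omega
    · rfl

-- ===== VERDICT (by name: the statement is the Claim_ definition above) =====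
theorem check_increasing_straight_spec : Claim_equal_check_increasing_straight := by
  intro password hdom
  unfold Spec_check_increasing_straight check_increasing_straight check_increasing_straight_alt
  rw [pvLoopA_eq_tri, pvLoopB_eq_tri, pvTri_sentinel]
  intro x hx
  simp only [List.mem_map] at hx
  obtain ⟨c, hc, rfl⟩ := hx
  have : pvDomChar c = true := by
    have := hdom
    unfold Dom_check_increasing_straight pvDomStr at this
    exact List.all_eq_true.mp this c hc
  unfold pvDomChar at this
  simp only [Bool.or_eq_true, Bool.and_eq_true, decide_eq_true_eq, beq_iff_eq] at this
  omega
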